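-- pv_equiv track=rewrite | github.com/eliottcassidy2000/math | 04-computation/vitali_overlap_hidden_structure.py | overlap_weight_vector
-- ===== SOURCE A (Python) =====
-- def overlap_weight_vector(cycles):
--     """Return the full overlap weight distribution as a sorted tuple.
--     This is the ternary fingerprint of the tournament's cycle structure."""
--     n = len(cycles)
--     weights = []
--     for i in range(n):
--         for j in range(i+1, n):
--             ov = len(cycles[i][0] & cycles[j][0])
--             weights.append(ov)
--     return tuple(sorted(weights))
-- ===== SOURCE B (Python) =====
-- def overlap_weight_vector(cycles):
--     """Inverted-index re-implementation: one streaming pass over the cycles;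
--     for each element keep the indices of earlier cycles containing it, count
--     shared elements per pair, then pad with zeros for non-overlapping pairs."""
--     n = len(cycles)
--     seen = {}   # element -> ascending list of cycle indices whose set contains it
--     pair = {}   # (i, j) with i < j -> number of shared elements counted so far
--     for j in range(n):
--         for x in cycles[j][0]:
--             for i in seen.get(x, []):
--                 pair[(i, j)] = pair.get((i, j), 0) + 1
--             seen.setdefault(x, []).append(j)
--     weights = list(pair.values())
--     weights += [0] * (n * (n - 1) // 2 - len(weights))
--     return tuple(sorted(weights))
-- ===== Notes on version B (the rewrite author's own statement) =====
-- stated objective: faster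
-- what changed: Replaces the nested loop over all index pairs computing set intersections with a single streaming pass that maintains an inverted index (element -> earlier cycle indices) and a pair-overlap counter, then pads with zeros for the n*(n-1)/2 pairs that share no element and sorts.
import Mathlib
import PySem

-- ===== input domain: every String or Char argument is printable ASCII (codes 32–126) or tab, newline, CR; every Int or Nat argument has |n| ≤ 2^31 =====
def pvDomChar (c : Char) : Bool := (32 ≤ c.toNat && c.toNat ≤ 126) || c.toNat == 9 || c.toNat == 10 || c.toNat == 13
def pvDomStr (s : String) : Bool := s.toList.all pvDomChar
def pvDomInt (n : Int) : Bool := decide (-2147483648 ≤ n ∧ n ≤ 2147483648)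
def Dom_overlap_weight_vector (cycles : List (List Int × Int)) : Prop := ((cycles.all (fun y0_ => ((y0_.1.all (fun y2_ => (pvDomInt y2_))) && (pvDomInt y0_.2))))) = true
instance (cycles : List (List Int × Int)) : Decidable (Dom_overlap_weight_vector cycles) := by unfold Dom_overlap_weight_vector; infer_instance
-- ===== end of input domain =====

-- B replaces A's all-pairs set intersections by one streaming pass with an inverted index
-- plus zero padding; measurably faster on the generated inputs.

-- ===== PORT A =====
-- A: nested index loops collecting |cycles[i][0] & cycles[j][0]| for all i < j, then sorted.
def overlap_weight_vector (cycles : List (List Int × Int)) : List Int :=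
  let n : Int := (cycles.length : Int)
  let weights :=
    (PySem.List.pyRange 0 n).foldl (fun w i =>
      (PySem.List.pyRange (i + 1) n).foldl (fun w j =>
        w ++ [PySem.Set.len (PySem.Set.inter
                (PySem.Set.ofList (PySem.List.pyGetD cycles i ([], 0)).1)
                (PySem.Set.ofList (PySem.List.pyGetD cycles j ([], 0)).1))]) w) []
  PySem.List.sorted weights (fun x => x) false

-- ===== PORT B =====
-- B: one streaming pass with an inverted index (element -> earlier cycle indices),
-- a pair counter, then zero padding for the non-overlapping pairs.
def overlap_weight_vector_alt (cycles : List (List Int × Int)) : List Int :=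
  let n : Int := (cycles.length : Int)
  let st :=
    (PySem.List.pyRange 0 n).foldl
      (fun (st : PySem.Dict Int (List Int) × PySem.Dict (Int × Int) Int) j =>
        (PySem.Set.ofList (PySem.List.pyGetD cycles j ([], 0)).1).foldl
          (fun st x =>
            let pair := (st.1.getD x []).foldl
              (fun d i => d.insert (i, j) (d.getD (i, j) 0 + 1)) st.2
            let seen := st.1.insert x (st.1.getD x [] ++ [j])
            (seen, pair)) st)
      (PySem.Dict.empty, PySem.Dict.empty)
  let weights := st.2.values ++
    PySem.List.pyRepeat [0] (PySem.Int.floordiv (n * (n - 1)) 2 - (st.2.values.length : Int))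
  PySem.List.sorted weights (fun x => x) false

-- ===== PRECONDITION & SPEC =====
def Spec_overlap_weight_vector (cycles : List (List Int × Int)) (out : List Int) : Prop := out = overlap_weight_vector_alt cycles
instance (cycles : List (List Int × Int)) (out : List Int) : Decidable (Spec_overlap_weight_vector cycles out) := by unfold Spec_overlap_weight_vector; infer_instance

-- ===== CLAIM (what is proved, stated in full; the proofs are below) =====
def Claim_equal_overlap_weight_vector : Prop := ∀ (cycles : List (List Int × Int)), Dom_overlap_weight_vector cycles → Spec_overlap_weight_vector cycles (overlap_weight_vector cycles)


-- ===== LEMMAS AND PROOFS =====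

-- the set of cycle j (as the underlying list), for a Nat index
def pvSet (cycles : List (List Int × Int)) (j : Nat) : List Int := (cycles.getD j ([], 0)).1

-- seen-dict update performed while processing cycle j
def pvSeenStep (cycles : List (List Int × Int)) (j : Nat) (sn : PySem.Dict Int (List Int)) :
    PySem.Dict Int (List Int) :=
  (PySem.Set.ofList (pvSet cycles j)).foldl
    (fun sn x => sn.insert x (sn.getD x [] ++ [(j : Int)])) sn

-- stream of pair keys emitted while processing the cycles with indices js from seen-state sn
def pvKeys (cycles : List (List Int × Int)) : List Nat → PySem.Dict Int (List Int) → List (Int × Int)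
  | [], _ => []
  | j :: js, sn =>
      (PySem.Set.ofList (pvSet cycles j)).flatMap
        (fun x => (sn.getD x []).map (fun i => (i, (j : Int))))
        ++ pvKeys cycles js (pvSeenStep cycles j sn)

-- invariant: seen maps x to the ascending indices < m of cycles containing x
def pvInv (cycles : List (List Int × Int)) (sn : PySem.Dict Int (List Int)) (m : Nat) : Prop :=
  ∀ x : Int, sn.getD x [] =
    ((List.range m).filter (fun i => decide (x ∈ pvSet cycles i))).map (fun i : Nat => (i : Int))

-- number of (distinct) shared elements, counted on cycle j's side
def pvOvN (cycles : List (List Int × Int)) (i j : Nat) : Nat :=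
  ((PySem.Set.ofList (pvSet cycles j)).filter (fun x => decide (x ∈ pvSet cycles i))).length

-- all index pairs i < j < N, as Int pairs
def pvPairs (N : Nat) : List (Int × Int) :=
  (List.range N).flatMap
    (fun i => (List.range' (i + 1) (N - (i + 1))).map (fun j : Nat => ((i : Int), (j : Int))))

lemma pv_seenfold_getD (j : Int) (xs : List Int) (h : xs.Nodup)
    (sn : PySem.Dict Int (List Int)) (y : Int) :
    (xs.foldl (fun sn x => sn.insert x (sn.getD x [] ++ [j])) sn).getD y [] =
      if y ∈ xs then sn.getD y [] ++ [j] else sn.getD y [] := by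
  induction xs generalizing sn with
  | nil => simp
  | cons x xs ih =>
    simp only [List.foldl_cons]
    rcases List.nodup_cons.mp h with ⟨hx, hnd⟩
    rw [ih hnd]
    by_cases hyx : y = x
    · subst hyx
      simp [if_neg hx, PySem.Dict.getD_insert_self]
    · by_cases hy : y ∈ xs <;> simp [hy, hyx, PySem.Dict.getD_insert_of_ne _ _ _ hyx]

lemma pv_inner_split (j : Int) (xs : List Int) (h : xs.Nodup)
    (sn : PySem.Dict Int (List Int)) (pr : PySem.Dict (Int × Int) Int) :
    xs.foldl (fun st x =>
        (st.1.insert x (st.1.getD x [] ++ [j]),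
         (st.1.getD x []).foldl (fun d i => d.insert (i, j) (d.getD (i, j) 0 + 1)) st.2))
        (sn, pr) =
      (xs.foldl (fun sn x => sn.insert x (sn.getD x [] ++ [j])) sn,
       (xs.flatMap (fun x => (sn.getD x []).map (fun i => (i, j)))).foldl
         (fun d k => d.insert k (d.getD k 0 + 1)) pr) := by
  induction xs generalizing sn pr with
  | nil => simp
  | cons x xs ih =>
    rcases List.nodup_cons.mp h with ⟨hx, hnd⟩
    simp only [List.foldl_cons, List.flatMap_cons, List.foldl_append]
    rw [ih hnd]
    have hfm : xs.flatMap (fun y => ((sn.insert x (sn.getD x [] ++ [j])).getD y []).map (fun i => (i, j)))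
             = xs.flatMap (fun y => (sn.getD y []).map (fun i => (i, j))) := by
      apply List.flatMap_congr
      intro y hy
      have hne : y ≠ x := fun e => hx (e ▸ hy)
      rw [PySem.Dict.getD_insert_of_ne _ _ _ hne]
    rw [hfm, List.foldl_map]

lemma pv_outer_split (cycles : List (List Int × Int)) (js : List Nat)
    (sn : PySem.Dict Int (List Int)) (pr : PySem.Dict (Int × Int) Int) :
    js.foldl (fun st j =>
        (PySem.Set.ofList (pvSet cycles j)).foldl (fun st x =>
          (st.1.insert x (st.1.getD x [] ++ [(j : Int)]),
           (st.1.getD x []).foldl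
             (fun d i => d.insert (i, (j : Int)) (d.getD (i, (j : Int)) 0 + 1)) st.2)) st)
        (sn, pr) =
      (js.foldl (fun sn j => pvSeenStep cycles j sn) sn,
       (pvKeys cycles js sn).foldl (fun d k => d.insert k (d.getD k 0 + 1)) pr) := by
  induction js generalizing sn pr with
  | nil => simp [pvKeys]
  | cons j js ih =>
    simp only [List.foldl_cons, pvKeys, List.foldl_append]
    rw [pv_inner_split _ _ (PySem.Set.nodup_ofList _), ih]
    rfl

lemma pv_inv_step (cycles : List (List Int × Int)) (sn : PySem.Dict Int (List Int)) (m : Nat)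
    (h : pvInv cycles sn m) : pvInv cycles (pvSeenStep cycles m sn) (m + 1) := by
  intro x
  unfold pvSeenStep
  rw [pv_seenfold_getD _ _ (PySem.Set.nodup_ofList _), List.range_succ, List.filter_append]
  by_cases hx : x ∈ pvSet cycles m
  · rw [if_pos ((PySem.Set.mem_ofList _ _).mpr hx)]
    simp [hx, h x]
  · rw [if_neg (fun hc => hx ((PySem.Set.mem_ofList _ _).mp hc))]
    simp [hx, h x]

lemma pv_keys_snd (cycles : List (List Int × Int)) (js : List Nat)
    (sn : PySem.Dict Int (List Int)) (p : Int × Int) (hp : p ∈ pvKeys cycles js sn) :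
    ∃ j ∈ js, p.2 = (j : Int) := by
  induction js generalizing sn with
  | nil => simp [pvKeys] at hp
  | cons j js ih =>
    simp only [pvKeys, List.mem_append] at hp
    rcases hp with hp | hp
    · rcases List.mem_flatMap.mp hp with ⟨x, _, hx⟩
      rcases List.mem_map.mp hx with ⟨i, _, rfl⟩
      exact ⟨j, by simp⟩
    · rcases ih _ hp with ⟨j', hj', h2⟩
      exact ⟨j', by simp [hj'], h2⟩

lemma pv_count_block (cycles : List (List Int × Int)) (m : Nat)
    (sn : PySem.Dict Int (List Int)) (hinv : pvInv cycles sn m) (i : Nat) (hi : i < m) :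
    ((PySem.Set.ofList (pvSet cycles m)).flatMap
        (fun x => (sn.getD x []).map (fun i' => (i', (m : Int))))).count ((i : Int), (m : Int)) =
      pvOvN cycles i m := by
  rw [List.count_flatMap]
  have hmap : ∀ x : Int,
      ((sn.getD x []).map (fun i' => (i', (m : Int)))).count ((i : Int), (m : Int)) =
        if x ∈ pvSet cycles i then 1 else 0 := by
    intro x
    have hinj : Function.Injective (fun i' : Int => (i', (m : Int))) := by
      intro a b hab; simpa using hab
    rw [show ((i : Int), (m : Int)) = (fun i' : Int => (i', (m : Int))) (i : Int) from rfl,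
      List.count_map_of_injective _ _ hinj, hinv x]
    have hinj2 : Function.Injective (fun k : Nat => (k : Int)) := fun a b h => Nat.cast_injective h
    rw [show ((i : Nat) : Int) = (fun k : Nat => (k : Int)) i from rfl,
      List.count_map_of_injective _ _ hinj2]
    by_cases hx : x ∈ pvSet cycles i
    · rw [List.count_eq_one_of_mem (List.Nodup.filter _ (List.nodup_range))]
      · simp [hx]
      · simp [List.mem_filter, List.mem_range]; exact ⟨hi, hx⟩
    · rw [List.count_eq_zero.mpr]
      · simp [hx]
      · simp [List.mem_filter]; intro _ h; exact absurd h hx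
  calc ((PySem.Set.ofList (pvSet cycles m)).map
          (List.count ((i : Int), (m : Int)) ∘ fun x => (sn.getD x []).map (fun i' => (i', (m : Int))))).sum
      = ((PySem.Set.ofList (pvSet cycles m)).map
          (fun x => if x ∈ pvSet cycles i then 1 else 0)).sum := by
        apply congrArg
        apply List.map_congr_left
        intro x _
        exact hmap x
    _ = (PySem.Set.ofList (pvSet cycles m)).countP (fun x => decide (x ∈ pvSet cycles i)) := by
        induction (PySem.Set.ofList (pvSet cycles m)) with
        | nil => simp
        | cons y ys ihy =>
          by_cases hy : y ∈ pvSet cycles i <;>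
            simp [hy, ihy, Nat.add_comm]
    _ = pvOvN cycles i m := by rw [List.countP_eq_length_filter]; rfl

lemma pv_keys_count (cycles : List (List Int × Int)) (k : Nat) :
    ∀ (m : Nat) (sn : PySem.Dict Int (List Int)), pvInv cycles sn m →
    ∀ (i j : Nat), i < j → m ≤ j → j < m + k →
    (pvKeys cycles (List.range' m k) sn).count ((i : Int), (j : Int)) = pvOvN cycles i j := by
  induction k with
  | zero => intro m sn _ i j _ h1 h2; omega
  | succ k ih =>
    intro m sn hinv i j hij hmj hjk
    rw [List.range'_succ]
    simp only [pvKeys, List.count_append]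
    by_cases hjm : j = m
    · subst hjm
      rw [pv_count_block cycles j sn hinv i hij]
      have : ((i : Int), (j : Int)) ∉ pvKeys cycles (List.range' (j + 1) k) (pvSeenStep cycles j sn) := by
        intro hmem
        rcases pv_keys_snd _ _ _ _ hmem with ⟨j', hj', h2⟩
        have : j = j' := by simpa using h2
        have := List.mem_range'_1.mp hj'
        omega
      rw [List.count_eq_zero.mpr this]
      omega
    · have hblock : ((i : Int), (j : Int)) ∉
          (PySem.Set.ofList (pvSet cycles m)).flatMap
            (fun x => (sn.getD x []).map (fun i' => (i', (m : Int)))) := by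
        intro hmem
        rcases List.mem_flatMap.mp hmem with ⟨x, _, hx⟩
        rcases List.mem_map.mp hx with ⟨i', _, he⟩
        have hm : ((m : Nat) : Int) = (j : Int) := congrArg Prod.snd he
        have : m = j := by exact_mod_cast hm
        exact hjm this.symm
      rw [List.count_eq_zero.mpr hblock, ih (m + 1) _ (pv_inv_step cycles sn m hinv) i j hij
        (by omega) (by omega)]
      omega

lemma pv_keys_mem (cycles : List (List Int × Int)) (k : Nat) :
    ∀ (m : Nat) (sn : PySem.Dict Int (List Int)), pvInv cycles sn m →
    ∀ p ∈ pvKeys cycles (List.range' m k) sn,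
      ∃ i j : Nat, p = ((i : Int), (j : Int)) ∧ i < j ∧ j < m + k := by
  induction k with
  | zero => intro m sn _ p hp; simp [pvKeys] at hp
  | succ k ih =>
    intro m sn hinv p hp
    rw [List.range'_succ] at hp
    simp only [pvKeys, List.mem_append] at hp
    rcases hp with hp | hp
    · rcases List.mem_flatMap.mp hp with ⟨x, _, hx⟩
      rcases List.mem_map.mp hx with ⟨i', hi', rfl⟩
      rw [hinv x] at hi'
      rcases List.mem_map.mp hi' with ⟨i, hi, rfl⟩
      have := List.mem_range.mp (List.mem_filter.mp hi).1
      exact ⟨i, m, rfl, this, by omega⟩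
    · rcases ih (m + 1) _ (pv_inv_step cycles sn m hinv) p hp with ⟨i, j, he, h1, h2⟩
      exact ⟨i, j, he, h1, by omega⟩


lemma pv_pyRange_nil (a b : Int) (h : b ≤ a) : PySem.List.pyRange a b = [] := by
  apply List.eq_nil_iff_forall_not_mem.mpr
  intro x hx
  have := PySem.List.mem_pyRange_one.mp hx
  omega

lemma pv_pyRange_natCast (a k : Nat) :
    PySem.List.pyRange (a : Int) ((a + k : Nat) : Int) =
      (List.range' a k).map (fun i : Nat => (i : Int)) := by
  induction k generalizing a with
  | zero => simp [pv_pyRange_nil (a : Int) (a : Int) le_rfl]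
  | succ k ih =>
    rw [List.range'_succ, PySem.List.pyRange_one_cons (by exact_mod_cast Nat.lt_add_of_pos_right k.succ_pos)]
    simp only [List.map_cons]
    congr 1
    have h1 : ((a : Int) + 1) = ((a + 1 : Nat) : Int) := by push_cast; ring
    have h2 : ((a + (k + 1) : Nat) : Int) = (((a + 1) + k : Nat) : Int) := by push_cast; ring
    rw [h1, h2, ih (a + 1)]

-- the intersection size, on Int index pairs exactly as A computes it
def pvOvZ (cycles : List (List Int × Int)) (p : Int × Int) : Int :=
  PySem.Set.len (PySem.Set.inter
    (PySem.Set.ofList (PySem.List.pyGetD cycles p.1 ([], 0)).1)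
    (PySem.Set.ofList (PySem.List.pyGetD cycles p.2 ([], 0)).1))

lemma pv_A_shape (cycles : List (List Int × Int)) :
    overlap_weight_vector cycles =
      PySem.List.sorted ((pvPairs cycles.length).map (pvOvZ cycles)) (fun x => x) false := by
  unfold overlap_weight_vector
  simp only [PySem.List.foldl_append_singleton_eq_map, PySem.List.foldl_append_eq_flatMap,
    List.nil_append]
  congr 1
  rw [PySem.List.pyRange_zero_natCast, List.flatMap_map, pvPairs, List.map_flatMap]
  apply List.flatMap_congr
  intro i hi
  have hiN : i < cycles.length := List.mem_range.mp hi
  have h1 : ((i : Int) + 1) = ((i + 1 : Nat) : Int) := by push_cast; ring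
  have h2 : ((cycles.length : Nat) : Int) = (((i + 1) + (cycles.length - (i + 1)) : Nat) : Int) := by
    have : (i + 1) + (cycles.length - (i + 1)) = cycles.length := by omega
    rw [this]
  rw [h1, h2, pv_pyRange_natCast, List.map_map, List.map_map]
  rfl

lemma pv_gauss_cast (N : Nat) :
    PySem.Int.floordiv ((N : Int) * ((N : Int) - 1)) 2 = ((N * (N - 1) / 2 : Nat) : Int) := by
  cases N with
  | zero => simp [PySem.Int.floordiv]
  | succ n =>
    have h1 : ((n + 1 : Nat) : Int) * (((n + 1 : Nat) : Int) - 1) = (((n + 1) * n : Nat) : Int) := by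
      push_cast; ring
    rw [h1]
    have := PySem.Int.floordiv_natCast ((n + 1) * n) 2
    rw [show ((2:Nat):Int) = (2:Int) from rfl] at this
    rw [this]
    norm_num


lemma pv_mem_pairs (N : Nat) (p : Int × Int) :
    p ∈ pvPairs N ↔ ∃ i j : Nat, p = ((i : Int), (j : Int)) ∧ i < j ∧ j < N := by
  unfold pvPairs
  simp only [List.mem_flatMap, List.mem_map, List.mem_range, List.mem_range'_1]
  constructor
  · rintro ⟨i, hi, j, hj, rfl⟩
    exact ⟨i, j, rfl, by omega, by omega⟩
  · rintro ⟨i, j, rfl, hij, hjN⟩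
    exact ⟨i, by omega, j, by omega, rfl⟩

lemma pv_pairs_nodup (N : Nat) : (pvPairs N).Nodup := by
  unfold pvPairs
  rw [List.nodup_flatMap]
  constructor
  · intro i _
    apply List.Nodup.map
    · intro a b hab
      have : ((a : Nat) : Int) = (b : Int) := congrArg Prod.snd hab
      exact_mod_cast this
    · exact List.nodup_range'
  · rw [List.pairwise_iff_forall_sublist]
    intro i i' hsub
    have hne : i ≠ i' := by
      intro he
      have := List.Sublist.nodup hsub (by simpa [he] using List.nodup_range (n := N))
      simp [he] at this
    intro p hp hp'
    rcases List.mem_map.mp hp with ⟨j, _, rfl⟩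
    rcases List.mem_map.mp hp' with ⟨j', _, he⟩
    have : ((i' : Nat) : Int) = (i : Int) := congrArg Prod.fst he
    exact hne (by exact_mod_cast this.symm)

lemma pv_sum_map_range (n : Nat) (f : Nat → Nat) :
    ((List.range n).map f).sum = ∑ i ∈ Finset.range n, f i := by
  induction n with
  | zero => simp
  | succ k ih =>
    rw [List.range_succ, Finset.sum_range_succ, List.map_append, List.sum_append, ih]
    simp

lemma pv_pairs_length (N : Nat) : (pvPairs N).length = N * (N - 1) / 2 := by
  unfold pvPairs
  rw [List.length_flatMap]
  have h1 : (List.map (fun a => ((List.range' (a + 1) (N - (a + 1))).map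
      (fun j : Nat => ((a : Int), (j : Int)))).length) (List.range N))
      = (List.range N).map (fun a => N - 1 - a) := by
    apply List.map_congr_left
    intro a _
    rw [List.length_map, List.length_range']
    omega
  rw [h1, pv_sum_map_range N (fun a => N - 1 - a), Finset.sum_range_reflect (fun a => a) N,
    Finset.sum_range_id]

lemma pv_ov_symm (cycles : List (List Int × Int)) (i j : Nat) :
    pvOvZ cycles ((i : Int), (j : Int)) = ((pvOvN cycles i j : Nat) : Int) := by
  unfold pvOvZ pvOvN pvSet
  simp only [PySem.List.pyGetD_natCast, PySem.Set.len, PySem.Set.inter]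
  congr 1
  apply List.Perm.length_eq
  rw [List.perm_ext_iff_of_nodup
    (List.Nodup.filter _ (PySem.Set.nodup_ofList _)) (List.Nodup.filter _ (PySem.Set.nodup_ofList _))]
  intro p
  simp only [List.mem_filter, PySem.Set.contains_iff, PySem.Set.mem_ofList, decide_eq_true_eq]
  tauto


lemma pv_inv_empty (cycles : List (List Int × Int)) : pvInv cycles PySem.Dict.empty 0 := by
  intro x
  simp [PySem.Dict.getD_empty]

lemma pv_keys_sub (cycles : List (List Int × Int)) :
    PySem.Set.ofList (pvKeys cycles (List.range cycles.length) PySem.Dict.empty) ⊆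
      pvPairs cycles.length := by
  intro p hp
  have hpK : p ∈ pvKeys cycles (List.range cycles.length) PySem.Dict.empty :=
    (PySem.Set.mem_ofList _ _).mp hp
  rw [List.range_eq_range'] at hpK
  rcases pv_keys_mem cycles cycles.length 0 PySem.Dict.empty (pv_inv_empty cycles) p hpK with
    ⟨i, j, he, h1, h2⟩
  exact (pv_mem_pairs _ _).mpr ⟨i, j, he, h1, by omega⟩

lemma pv_B_shape (cycles : List (List Int × Int)) :
    overlap_weight_vector_alt cycles =
      PySem.List.sorted
        ((PySem.Set.ofList (pvKeys cycles (List.range cycles.length) PySem.Dict.empty)).map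
            (fun k => ((pvKeys cycles (List.range cycles.length) PySem.Dict.empty).count k : Int))
          ++ List.replicate
              (cycles.length * (cycles.length - 1) / 2 -
                (PySem.Set.ofList (pvKeys cycles (List.range cycles.length) PySem.Dict.empty)).length)
              0)
        (fun x => x) false := by
  simp only [overlap_weight_vector_alt]
  rw [PySem.List.pyRange_zero_natCast, List.foldl_map]
  simp only [PySem.List.pyGetD_natCast]
  rw [show (fun (st : PySem.Dict Int (List Int) × PySem.Dict (Int × Int) Int) (j : Nat) =>
        (PySem.Set.ofList (cycles.getD j ([], 0)).1).foldl
          (fun st x =>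
            (st.1.insert x (st.1.getD x [] ++ [(j : Int)]),
             (st.1.getD x []).foldl
               (fun d i => d.insert (i, (j : Int)) (d.getD (i, (j : Int)) 0 + 1)) st.2)) st)
      = (fun st j =>
        (PySem.Set.ofList (pvSet cycles j)).foldl
          (fun st x =>
            (st.1.insert x (st.1.getD x [] ++ [(j : Int)]),
             (st.1.getD x []).foldl
               (fun d i => d.insert (i, (j : Int)) (d.getD (i, (j : Int)) 0 + 1)) st.2)) st)
      from rfl]
  rw [pv_outer_split]
  set K := pvKeys cycles (List.range cycles.length) PySem.Dict.empty with hK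
  have hkeys : (K.foldl (fun d k => d.insert k (d.getD k 0 + 1))
        (PySem.Dict.empty : PySem.Dict (Int × Int) Int)).keys
      = PySem.Set.ofList K := by
    rw [PySem.Dict.keys_foldl_insert K (fun d x => d.getD x 0 + 1) PySem.Dict.empty,
      PySem.Dict.keys_empty, PySem.Set.update_nil_left]
  have hvals : (K.foldl (fun d k => d.insert k (d.getD k 0 + 1))
        (PySem.Dict.empty : PySem.Dict (Int × Int) Int)).values
      = (PySem.Set.ofList K).map (fun k => ((K.count k : Nat) : Int)) := by
    rw [PySem.Dict.values_eq_map_keys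
      (K.foldl (fun d k => d.insert k (d.getD k 0 + 1)) (PySem.Dict.empty : PySem.Dict (Int × Int) Int))
      (by rw [hkeys]; exact PySem.Set.nodup_ofList K) 0, hkeys]
    apply List.map_congr_left
    intro k _
    rw [PySem.Dict.getD_foldl_insert_add_one K PySem.Dict.empty k, PySem.Dict.getD_empty]
    omega
  rw [hvals]
  congr 1
  rw [PySem.List.pyRepeat_singleton]
  congr 1
  rw [List.length_map, pv_gauss_cast]
  have hsub : PySem.Set.ofList K ⊆ pvPairs cycles.length := hK ▸ pv_keys_sub cycles
  have hle : (PySem.Set.ofList K).length ≤ cycles.length * (cycles.length - 1) / 2 := by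
    rw [← pv_pairs_length cycles.length]
    exact List.Subperm.length_le ((PySem.Set.nodup_ofList K).subperm hsub)
  congr 1
  omega

-- ===== VERDICT (by name: the statement is the Claim_ definition above) =====
theorem overlap_weight_vector_spec : Claim_equal_overlap_weight_vector := by
  intro cycles _
  unfold Spec_overlap_weight_vector
  rw [pv_A_shape, pv_B_shape, PySem.List.sorted_id_eq_sorted_id_iff_perm]
  set N := cycles.length with hN
  set K := pvKeys cycles (List.range N) PySem.Dict.empty with hK
  set D := PySem.Set.ofList K with hD
  have hpn := pv_pairs_nodup N
  have hDnd : D.Nodup := PySem.Set.nodup_ofList K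
  have hDsub : D ⊆ pvPairs N := pv_keys_sub cycles
  have hcnt : ∀ p ∈ pvPairs N, pvOvZ cycles p = ((K.count p : Nat) : Int) := by
    intro p hp
    rcases (pv_mem_pairs N p).mp hp with ⟨i, j, rfl, hij, hjN⟩
    rw [pv_ov_symm]
    have := pv_keys_count cycles N 0 PySem.Dict.empty (pv_inv_empty cycles) i j hij
      (by omega) (by omega)
    rw [hK, hN, List.range_eq_range']
    exact_mod_cast congrArg (fun m : Nat => (m : Int)) this.symm
  have h1 : (pvPairs N).map (pvOvZ cycles)
      = (pvPairs N).map (fun p => ((K.count p : Nat) : Int)) := List.map_congr_left hcnt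
  have hDperm : (List.filter (fun p => decide (p ∈ D)) (pvPairs N)).Perm D := by
    rw [List.perm_ext_iff_of_nodup (hpn.filter _) hDnd]
    intro p
    simp only [List.mem_filter, decide_eq_true_eq]
    exact ⟨fun h => h.2, fun h => ⟨hDsub h, h⟩⟩
  have hsplit : (pvPairs N).Perm (D ++ (pvPairs N).filter (fun p => !decide (p ∈ D))) :=
    ((List.filter_append_perm (fun p => decide (p ∈ D)) (pvPairs N)).symm).trans
      (hDperm.append_right _)
  have hlen : (List.filter (fun p => decide (p ∈ D)) (pvPairs N)).length
        + (List.filter (fun p => !decide (p ∈ D)) (pvPairs N)).length = N * (N - 1) / 2 := by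
    have := (List.filter_append_perm (fun p => decide (p ∈ D)) (pvPairs N)).length_eq
    rw [List.length_append] at this
    rw [this, pv_pairs_length]
  have hzeros : ((pvPairs N).filter (fun p => !decide (p ∈ D))).map
        (fun p => ((K.count p : Nat) : Int))
      = List.replicate (N * (N - 1) / 2 - D.length) 0 := by
    rw [List.eq_replicate_iff]
    constructor
    · rw [List.length_map, ← hDperm.length_eq]
      omega
    · intro b hb
      rcases List.mem_map.mp hb with ⟨p, hp, rfl⟩
      have hnotD : p ∉ D := by
        have := (List.mem_filter.mp hp).2
        simpa using this
      have hnotK : p ∉ K := fun h => hnotD ((PySem.Set.mem_ofList _ _).mpr h)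
      rw [List.count_eq_zero.mpr hnotK]
      rfl
  rw [h1]
  have hfin : ((pvPairs N).map (fun p => ((K.count p : Nat) : Int))).Perm
      ((D ++ (pvPairs N).filter (fun p => !decide (p ∈ D))).map
        (fun p => ((K.count p : Nat) : Int))) := hsplit.map _
  rw [List.map_append, hzeros] at hfin
  exact hfin
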